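-- pv_equiv track=rewrite | github.com/emagrina/tanuki-bot | src/tanuki_bot/core/task_execute.py | _trim_trailing_noise
-- ===== SOURCE A (Python) =====
-- def _trim_trailing_noise(diff_text: str) -> str:
--     lines = diff_text.splitlines(True)
--     out: list[str] = []
--     started = False
--
--     for line in lines:
--         if not started:
--             if line.startswith("diff --git") or line.startswith("--- "):
--                 started = True
--                 out.append(line)
--             continue
--
--         if line.strip() in {"```", "```diff", "```patch"}:
--             break
--         if line.strip() == "---":
--             break
--
--         out.append(line)
--
--     return "".join(out).strip() + "\n"
-- ===== SOURCE B (Python) =====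
-- def _line_end(s: str, i: int) -> int:
--     """Offset just past the line break that ends the line starting at offset i."""
--     n = len(s)
--     while i < n and s[i] != "\n" and s[i] != "\r":
--         i += 1
--     if i >= n:
--         return n
--     if s[i] == "\r" and i + 1 < n and s[i + 1] == "\n":
--         return i + 2
--     return i + 1
--
--
-- def _trim_trailing_noise(diff_text: str) -> str:
--     # Cursor walk over the raw string: no line list is ever built; the result
--     # is a single slice of the input between two character offsets.
--     n = len(diff_text)
--     i = 0
--     while i < n:
--         if diff_text.startswith(("diff --git", "--- "), i):
--             break
--         i = _line_end(diff_text, i)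
--     if i >= n:
--         return "\n"
--     start = i
--     i = _line_end(diff_text, i)
--     while i < n:
--         j = _line_end(diff_text, i)
--         if diff_text[i:j].strip() in ("```", "```diff", "```patch", "---"):
--             break
--         i = j
--     return diff_text[start:i].strip() + "\n"
-- ===== Notes on version B (the rewrite author's own statement) =====
-- stated objective: alternative
-- what changed: A materialises a line list via splitlines(True) and accumulates kept lines in an output list under a started flag; B never builds any list: it walks a single character-offset cursor over the raw string (jumping line break to line break), records the start and end offsets, and returns one slice diff_text[start:end].strip()+'\n'.
import Mathlib
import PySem

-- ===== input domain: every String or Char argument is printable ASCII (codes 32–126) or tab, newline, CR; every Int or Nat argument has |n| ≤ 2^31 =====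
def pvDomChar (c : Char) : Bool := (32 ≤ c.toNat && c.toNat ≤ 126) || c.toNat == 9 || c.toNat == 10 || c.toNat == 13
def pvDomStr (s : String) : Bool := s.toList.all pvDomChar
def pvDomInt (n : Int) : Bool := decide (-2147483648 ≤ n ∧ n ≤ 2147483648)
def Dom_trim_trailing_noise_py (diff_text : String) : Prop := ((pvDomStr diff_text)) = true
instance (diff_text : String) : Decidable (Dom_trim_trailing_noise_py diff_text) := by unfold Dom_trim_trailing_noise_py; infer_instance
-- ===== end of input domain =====

-- B replaces A's splitlines(True) line list + started-flag accumulator by a cursor walk over the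
-- raw string: it jumps from line break to line break by character offset, never builds a list,
-- and returns one slice diff_text[start:end].strip() + '\n'. Same asymptotic cost.

-- ===== PORT A =====
-- str.splitlines(keepends=True), ported by hand: exact on Dom, where the only
-- line-break characters that can occur are '\n' and '\r' (so '\r\n', '\r', '\n').
def splitKeep : List Char → List Char → List (List Char)
  | [], acc => if acc = [] then [] else [acc.reverse]
  | c :: cs, acc =>
    if c = '\n' then (acc.reverse ++ ['\n']) :: splitKeep cs []
    else if c = '\r' then
      if cs.head? = some '\n' then (acc.reverse ++ ['\r', '\n']) :: splitKeep cs.tail []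
      else (acc.reverse ++ ['\r']) :: splitKeep cs []
    else splitKeep cs (c :: acc)
  termination_by cs _ => cs.length
  decreasing_by all_goals (simp [List.length_tail]; try omega)

-- the loop: for line in lines, with the 'started' flag and out accumulator; returning out at a break / end
def goA : List (List Char) → Bool → List (List Char) → List (List Char)
  | [], _, out => out
  | l :: ls, started, out =>
    if !started then
      if PySem.Chars.startswith l ("diff --git".toList) || PySem.Chars.startswith l ("--- ".toList) then
        goA ls true (out ++ [l])
      else
        goA ls started out
    else
      if ["```".toList, "```diff".toList, "```patch".toList].contains (PySem.Chars.strip l) then out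
      else if PySem.Chars.strip l == "---".toList then out
      else goA ls started (out ++ [l])

def trim_trailing_noise_py (diff_text : String) : String :=
  let lines := splitKeep diff_text.toList []
  let out := goA lines false []
  String.ofList (PySem.Chars.strip (PySem.Chars.join [] out) ++ ['\n'])

-- ===== PORT B =====
-- _line_end(s, i): the while loop reads s[i] / s[i+1]; ported with the remaining suffix
-- cs.drop i as the cursor (its head IS s[i], its second element s[i+1]), index carried along
def eolPgo : List Char → Nat → Nat
  | [], i => i
  | c :: rest, i =>
    if c ≠ '\n' ∧ c ≠ '\r' then eolPgo rest (i + 1)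
    else if c = '\r' ∧ rest.head? = some '\n' then i + 2
    else i + 1

def eolP (cs : List Char) (i : Nat) : Nat :=
  if i < cs.length then eolPgo (cs.drop i) i else cs.length

-- needed only so the two search loops below may cite them for termination
lemma lt_eolPgo : ∀ (rest : List Char) (i : Nat), rest ≠ [] → i < eolPgo rest i := by
  intro rest
  induction rest with
  | nil => intro i h; exact absurd rfl h
  | cons c rest ih =>
    intro i _
    simp only [eolPgo]
    split
    · cases hr : rest with
      | nil => subst hr; simp [eolPgo]
      | cons d ds =>
        have h2 := ih (i + 1) (by simp [hr])
        rw [hr] at h2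
        omega
    · split <;> omega

lemma lt_eolP (cs : List Char) (i : Nat) (h : i < cs.length) : i < eolP cs i := by
  rw [eolP, if_pos h]
  refine lt_eolPgo (cs.drop i) i ?_
  intro hc
  have := congrArg List.length hc
  simp at this
  omega

-- the first while loop: advance line start by line start until a header line is found (i ≥ n = none)
def findStartP (cs : List Char) (i : Nat) : Nat :=
  if h : i < cs.length then
    if PySem.Chars.startswith (cs.drop i) ("diff --git".toList)
        || PySem.Chars.startswith (cs.drop i) ("--- ".toList) then i
    else findStartP cs (eolP cs i)
  else i
  termination_by cs.length - i
  decreasing_by exact Nat.sub_lt_sub_left h (lt_eolP cs i h)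

-- the second while loop: advance until a terminator line; diff_text[i:j].strip() is the slice
def findEndP (cs : List Char) (i : Nat) : Nat :=
  if h : i < cs.length then
    let j := eolP cs i
    if ["```".toList, "```diff".toList, "```patch".toList, "---".toList].contains
        (PySem.Chars.strip (PySem.List.slice cs (some (i : Int)) (some (j : Int)))) then i
    else findEndP cs j
  else i
  termination_by cs.length - i
  decreasing_by exact Nat.sub_lt_sub_left h (lt_eolP cs i h)

def trim_trailing_noise_py_alt (diff_text : String) : String :=
  let cs := diff_text.toList
  let start := findStartP cs 0
  if cs.length ≤ start then "\n"
  else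
    let e := findEndP cs (eolP cs start)
    String.ofList (PySem.Chars.strip (PySem.List.slice cs (some (start : Int)) (some (e : Int))) ++ ['\n'])

-- ===== PRECONDITION & SPEC =====
def Spec_trim_trailing_noise_py (diff_text : String) (out : String) : Prop := out = trim_trailing_noise_py_alt diff_text
instance (diff_text : String) (out : String) : Decidable (Spec_trim_trailing_noise_py diff_text out) := by unfold Spec_trim_trailing_noise_py; infer_instance

-- ===== CLAIM (what is proved, stated in full; the proofs are below) =====
def Claim_equal_trim_trailing_noise_py : Prop := ∀ (diff_text : String), Dom_trim_trailing_noise_py diff_text → Spec_trim_trailing_noise_py diff_text (trim_trailing_noise_py diff_text)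

-- ===== LEMMAS AND PROOFS =====

-- length (line break included) of the first line of cs
def eolLen : List Char → Nat
  | [] => 0
  | c :: cs =>
    if c = '\n' then 1
    else if c = '\r' then (if cs.head? = some '\n' then 2 else 1)
    else 1 + eolLen cs

def isTermB (l : List Char) : Bool :=
  ["```".toList, "```diff".toList, "```patch".toList, "---".toList].contains (PySem.Chars.strip l)

lemma eolLen_pos (cs : List Char) (h : cs ≠ []) : 0 < eolLen cs := by
  cases cs with
  | nil => exact absurd rfl h
  | cons c cs => simp only [eolLen]; split_ifs <;> omega

lemma eolLen_le (cs : List Char) : eolLen cs ≤ cs.length := by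
  induction cs with
  | nil => simp [eolLen]
  | cons c cs ih =>
    simp only [eolLen, List.length_cons]
    split_ifs with h1 h2 h3
    · omega
    · cases cs with
      | nil => simp at h3
      | cons d ds => simp only [List.length_cons]; omega
    · omega
    · omega

lemma join_nil_flatten : ∀ xs : List (List Char), PySem.Chars.join [] xs = xs.flatten
  | [] => rfl
  | [a] => by simp [PySem.Chars.join, List.intercalate]
  | a :: b :: xs => by
    have ih := join_nil_flatten (b :: xs)
    simp only [PySem.Chars.join, List.intercalate, List.intersperse] at *
    simp only [List.flatten_cons] at *
    simp [ih]

-- splitKeep produces the first line (take eolLen) and recurses on the rest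
lemma splitKeep_eq : ∀ (cs acc : List Char), cs ≠ [] →
    splitKeep cs acc = (acc.reverse ++ cs.take (eolLen cs)) :: splitKeep (cs.drop (eolLen cs)) [] := by
  intro cs
  induction cs with
  | nil => intro acc h; exact absurd rfl h
  | cons c cs ih =>
    intro acc _
    by_cases h1 : c = '\n'
    · subst h1; simp [splitKeep, eolLen]
    · by_cases h2 : c = '\r'
      · subst h2
        by_cases h3 : cs.head? = some '\n'
        · cases cs with
          | nil => simp at h3
          | cons d ds =>
            simp only [List.head?_cons, Option.some.injEq] at h3
            subst h3
            simp [splitKeep, eolLen]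
        · simp [splitKeep, eolLen, h3]
      · cases hcs : cs with
        | nil =>
          subst hcs
          simp [splitKeep, eolLen, h1, h2]
        | cons d ds =>
          have hne : cs ≠ [] := by rw [hcs]; simp
          rw [← hcs]
          have : splitKeep (c :: cs) acc = splitKeep cs (c :: acc) := by
            simp [splitKeep, h1, h2]
          rw [this, ih (c :: acc) hne]
          have he : eolLen (c :: cs) = 1 + eolLen cs := by simp [eolLen, h1, h2]
          rw [he]
          simp [Nat.add_comm 1 (eolLen cs)]

lemma flatten_splitKeep_aux : ∀ (n : Nat) (cs : List Char), cs.length ≤ n → (splitKeep cs []).flatten = cs := by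
  intro n
  induction n with
  | zero =>
    intro cs h
    cases cs with
    | nil => simp [splitKeep]
    | cons c cs => simp at h
  | succ n ih =>
    intro cs h
    by_cases hcs : cs = []
    · subst hcs; simp [splitKeep]
    · rw [splitKeep_eq cs [] hcs]
      simp only [List.flatten_cons, List.reverse_nil, List.nil_append]
      rw [ih (cs.drop (eolLen cs)) (by
        have := eolLen_pos cs hcs
        simp only [List.length_drop]
        omega)]
      exact List.take_append_drop _ cs

lemma flatten_splitKeep (cs : List Char) : (splitKeep cs []).flatten = cs :=
  flatten_splitKeep_aux cs.length cs le_rfl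

-- _line_end computed at a position i is i plus the first-line length of the remaining suffix
lemma eolPgo_eq : ∀ (rest : List Char) (i : Nat), eolPgo rest i = i + eolLen rest := by
  intro rest
  induction rest with
  | nil => intro i; simp [eolPgo, eolLen]
  | cons c rest ih =>
    intro i
    simp only [eolPgo, eolLen]
    by_cases h1 : c ≠ '\n' ∧ c ≠ '\r'
    · rw [if_pos h1, if_neg h1.1, if_neg h1.2, ih]
      omega
    · rw [if_neg h1]
      by_cases h2 : c = '\n'
      · have : ¬(c = '\r' ∧ rest.head? = some '\n') := by simp [h2]
        rw [if_neg this, if_pos h2]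
      · have h3 : c = '\r' := by tauto
        rw [if_neg h2, if_pos h3]
        by_cases h4 : rest.head? = some '\n'
        · rw [if_pos ⟨h3, h4⟩, if_pos h4]
        · rw [if_neg (by tauto), if_neg h4]

lemma eolP_eq (cs : List Char) (i : Nat) (h : i ≤ cs.length) :
    eolP cs i = i + eolLen (cs.drop i) := by
  by_cases hlt : i < cs.length
  · rw [eolP, if_pos hlt, eolPgo_eq]
  · have : i = cs.length := by omega
    subst this
    simp [eolP, List.drop_length, eolLen]

-- a pattern without line-break characters matches at a line start iff it matches the keepends line
lemma prefix_len_le_eolLen : ∀ (pat cs : List Char), (∀ c ∈ pat, ¬(c = '\n' ∨ c = '\r')) →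
    pat <+: cs → pat.length ≤ eolLen cs := by
  intro pat
  induction pat with
  | nil => intro cs _ _; simp
  | cons p ps ih =>
    intro cs hp hpre
    cases cs with
    | nil => simp at hpre
    | cons c cs' =>
      rw [List.cons_prefix_cons] at hpre
      obtain ⟨rfl, hps⟩ := hpre
      have hnp := hp p (by simp)
      have := ih cs' (fun c hc => hp c (by simp [hc])) hps
      simp only [eolLen, if_neg (by tauto : ¬ p = '\n'), if_neg (by tauto : ¬ p = '\r'), List.length_cons]
      omega

lemma startswith_take_eol (cs pat : List Char) (hp : ∀ c ∈ pat, ¬(c = '\n' ∨ c = '\r')) :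
    PySem.Chars.startswith cs pat = PySem.Chars.startswith (cs.take (eolLen cs)) pat := by
  by_cases h : pat <+: cs
  · have h1 : PySem.Chars.startswith cs pat = true := (PySem.Chars.startswith_iff cs pat).mpr h
    have hle := prefix_len_le_eolLen pat cs hp h
    have h2 : pat <+: cs.take (eolLen cs) := by
      rw [List.prefix_iff_eq_take] at h ⊢
      rw [List.take_take, Nat.min_eq_left hle]
      exact h
    rw [h1, ((PySem.Chars.startswith_iff _ pat).mpr h2)]
  · have h1 : PySem.Chars.startswith cs pat ≠ true := fun hc => h ((PySem.Chars.startswith_iff cs pat).mp hc)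
    have h2 : PySem.Chars.startswith (cs.take (eolLen cs)) pat ≠ true := by
      intro hc
      exact h (((PySem.Chars.startswith_iff _ pat).mp hc).trans (List.take_prefix _ cs))
    simp only [Bool.not_eq_true] at h1 h2
    rw [h1, h2]

-- A's two terminator tests together are B's single four-element membership test
lemma termAB (l : List Char) :
    isTermB l =
      (["```".toList, "```diff".toList, "```patch".toList].contains (PySem.Chars.strip l)
        || PySem.Chars.strip l == "---".toList) := by
  simp only [isTermB, List.contains_cons, List.contains_nil, Bool.or_false, Bool.or_assoc]

-- started phase of A collects exactly the takeWhile prefix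
lemma goA_true (ls : List (List Char)) : ∀ out,
    goA ls true out = out ++ ls.takeWhile (fun l => !isTermB l) := by
  induction ls with
  | nil => simp [goA]
  | cons l ls ih =>
    intro out
    simp only [goA, Bool.not_true, Bool.false_eq_true, if_false, List.takeWhile_cons]
    cases hc3 : (["```".toList, "```diff".toList, "```patch".toList].contains (PySem.Chars.strip l)) with
    | true =>
      have ht : isTermB l = true := by rw [termAB, hc3]; rfl
      simp only [if_true, ht, Bool.not_true, Bool.false_eq_true, if_false, List.append_nil]
    | false =>
      cases hc4 : (PySem.Chars.strip l == "---".toList) with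
      | true =>
        have ht : isTermB l = true := by rw [termAB, hc3, hc4]; rfl
        simp only [Bool.false_eq_true, if_false, if_true, ht, Bool.not_true, List.append_nil]
      | false =>
        have ht : isTermB l = false := by rw [termAB, hc3, hc4]; rfl
        simp only [Bool.false_eq_true, if_false, ht, Bool.not_false, if_true, ih]
        simp

-- B's terminator loop walks exactly past the takeWhile prefix of the remaining lines
lemma findEndP_eq (cs : List Char) : ∀ (n i : Nat), cs.length - i ≤ n → i ≤ cs.length →
    findEndP cs i = i + ((splitKeep (cs.drop i) []).takeWhile (fun l => !isTermB l)).flatten.length := by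
  intro n
  induction n with
  | zero =>
    intro i hn hi
    have : i = cs.length := by omega
    subst this
    simp [findEndP, splitKeep]
  | succ n ih =>
    intro i hn hi
    by_cases hlt : i < cs.length
    · have hne : cs.drop i ≠ [] := by
        intro hc
        have := congrArg List.length hc
        simp at this
        omega
      have hj : eolP cs i = i + eolLen (cs.drop i) := eolP_eq cs i (by omega)
      have hslice : PySem.List.slice cs (some (i : Int)) (some ((eolP cs i : Nat) : Int))
          = (cs.drop i).take (eolLen (cs.drop i)) := by
        rw [hj, PySem.List.slice_natCast]
        congr 1
        omega
      rw [splitKeep_eq _ [] hne]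
      simp only [List.reverse_nil, List.nil_append, List.takeWhile_cons]
      unfold findEndP
      rw [dif_pos hlt]
      simp only [hslice]
      cases ht : isTermB ((cs.drop i).take (eolLen (cs.drop i))) with
      | true =>
        rw [if_pos (by simpa [isTermB] using ht)]
        simp
      | false =>
        rw [if_neg (by simpa [isTermB] using ht)]
        have hpos := eolLen_pos _ hne
        have hlen := eolLen_le (cs.drop i)
        simp only [List.length_drop] at hlen
        have hd : cs.drop (eolP cs i) = (cs.drop i).drop (eolLen (cs.drop i)) := by
          rw [hj, List.drop_drop, Nat.add_comm]
        rw [ih (eolP cs i) (by rw [hj]; omega) (by rw [hj]; omega), hd]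
        have hdl : (cs.drop i).length = cs.length - i := by simp
        simp only [Bool.not_false, if_true, List.flatten_cons, List.length_append,
          List.length_take]
        omega
    · have : i = cs.length := by omega
      subst this
      simp [findEndP, splitKeep]

-- the flatten of the kept lines is the corresponding prefix of the remaining text
lemma flatten_takeWhile_take (rest : List Char) :
    ((splitKeep rest []).takeWhile (fun l => !isTermB l)).flatten
      = rest.take ((splitKeep rest []).takeWhile (fun l => !isTermB l)).flatten.length := by
  have hpre : ((splitKeep rest []).takeWhile (fun l => !isTermB l)).flatten <+: rest := by
    obtain ⟨t, ht⟩ := (List.takeWhile_prefix (l := splitKeep rest []) (fun l => !isTermB l))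
    exact ⟨t.flatten, by rw [← List.flatten_append, ht, flatten_splitKeep]⟩
  exact List.prefix_iff_eq_take.mp hpre

lemma pat1_no_break : ∀ c ∈ ("diff --git".toList), ¬(c = '\n' ∨ c = '\r') := by
  have h : "diff --git".toList = ['d','i','f','f',' ','-','-','g','i','t'] := by rfl
  rw [h]; intro c hc; fin_cases hc <;> simp

lemma pat2_no_break : ∀ c ∈ ("--- ".toList), ¬(c = '\n' ∨ c = '\r') := by
  have h : "--- ".toList = ['-','-','-',' '] := by rfl
  rw [h]; intro c hc; fin_cases hc <;> simp

-- main correspondence for the search phase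
lemma main_corr (cs : List Char) : ∀ (n i : Nat), cs.length - i ≤ n → i ≤ cs.length →
    PySem.Chars.join [] (goA (splitKeep (cs.drop i) []) false []) =
      (if cs.length ≤ findStartP cs i then ([] : List Char)
       else PySem.List.slice cs (some ((findStartP cs i : Nat) : Int))
         (some ((findEndP cs (eolP cs (findStartP cs i)) : Nat) : Int))) := by
  intro n
  induction n with
  | zero =>
    intro i hn hi
    have : i = cs.length := by omega
    subst this
    simp [splitKeep, goA, findStartP, PySem.Chars.join, List.intercalate]
  | succ n ih =>
    intro i hn hi
    by_cases hlt : i < cs.length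
    · have hne : cs.drop i ≠ [] := by
        intro hc
        have := congrArg List.length hc
        simp at this
        omega
      have hpos := eolLen_pos _ hne
      have hlen := eolLen_le (cs.drop i)
      simp only [List.length_drop] at hlen
      have hj : eolP cs i = i + eolLen (cs.drop i) := eolP_eq cs i (by omega)
      have hsw1 := startswith_take_eol (cs.drop i) ("diff --git".toList) pat1_no_break
      have hsw2 := startswith_take_eol (cs.drop i) ("--- ".toList) pat2_no_break
      rw [splitKeep_eq _ [] hne]
      simp only [List.reverse_nil, List.nil_append]
      unfold findStartP
      rw [dif_pos hlt]
      cases hs : (PySem.Chars.startswith (cs.drop i) ("diff --git".toList)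
          || PySem.Chars.startswith (cs.drop i) ("--- ".toList)) with
      | true =>
        -- header found at offset i
        have hsline : (PySem.Chars.startswith ((cs.drop i).take (eolLen (cs.drop i))) ("diff --git".toList)
            || PySem.Chars.startswith ((cs.drop i).take (eolLen (cs.drop i))) ("--- ".toList)) = true := by
          rw [← hsw1, ← hsw2]; exact hs
        rw [if_pos rfl]
        rw [if_neg (by omega)]
        simp only [goA, Bool.not_false, if_true, hsline]
        rw [goA_true]
        simp only [List.nil_append, List.singleton_append]
        rw [join_nil_flatten, List.flatten_cons]
        set rls := splitKeep ((cs.drop i).drop (eolLen (cs.drop i))) [] with hrls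
        have hdj : cs.drop (eolP cs i) = (cs.drop i).drop (eolLen (cs.drop i)) := by
          rw [hj, List.drop_drop, Nat.add_comm]
        have hK := findEndP_eq cs cs.length (eolP cs i) (by omega) (by rw [hj]; omega)
        rw [hdj] at hK
        set K := (rls.takeWhile (fun l => !isTermB l)).flatten.length with hKdef
        have he : findEndP cs (eolP cs i) = i + eolLen (cs.drop i) + K := by rw [hK, hj]
        rw [he, PySem.List.slice_natCast]
        have : i + eolLen (cs.drop i) + K - i = eolLen (cs.drop i) + K := by omega
        rw [this, List.take_add]
        congr 1
        rw [flatten_takeWhile_take ((cs.drop i).drop (eolLen (cs.drop i)))]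
      | false =>
        have hsline : (PySem.Chars.startswith ((cs.drop i).take (eolLen (cs.drop i))) ("diff --git".toList)
            || PySem.Chars.startswith ((cs.drop i).take (eolLen (cs.drop i))) ("--- ".toList)) = false := by
          rw [← hsw1, ← hsw2]; exact hs
        simp only [Bool.false_eq_true, if_false]
        have hdj : cs.drop (eolP cs i) = (cs.drop i).drop (eolLen (cs.drop i)) := by
          rw [hj, List.drop_drop, Nat.add_comm]
        have hstep : goA (((cs.drop i).take (eolLen (cs.drop i))) :: splitKeep ((cs.drop i).drop (eolLen (cs.drop i))) []) false []
            = goA (splitKeep ((cs.drop i).drop (eolLen (cs.drop i))) []) false [] := by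
          simp only [goA, Bool.not_false, if_true, hsline, Bool.false_eq_true, if_false]
        rw [hstep, ← hdj]
        exact ih (eolP cs i) (by rw [hj]; omega) (by rw [hj]; omega)
    · have : i = cs.length := by omega
      subst this
      simp [splitKeep, goA, findStartP, PySem.Chars.join, List.intercalate]

-- ===== VERDICT (by name: the statement is the Claim_ definition above) =====
theorem trim_trailing_noise_py_spec : Claim_equal_trim_trailing_noise_py := by
  intro s _
  unfold Spec_trim_trailing_noise_py trim_trailing_noise_py trim_trailing_noise_py_alt
  simp only []
  have h := main_corr s.toList s.toList.length 0 (by omega) (by omega)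
  rw [List.drop_zero] at h
  rw [h]
  by_cases hc : s.toList.length ≤ findStartP s.toList 0
  · rw [if_pos hc, if_pos hc]
    rfl
  · rw [if_neg hc, if_neg hc]
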